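-- pv_equiv track=rewrite | github.com/ankxl/CS50_Intro_to_Python_Programming | Problem Set 5/test_plates/plates.py | check_number_order
-- ===== SOURCE A (Python) =====
-- def check_number_order(s):
--     number = False
--     for i in range(len(s)):
--         if s[i].isnumeric():
--             if s[i] == '0' and number == False:
--                 return False
--             number = True
--         if number == True and s[i].isalpha():
--             return False
--     return True
-- ===== SOURCE B (Python) =====
-- def check_number_order(s):
--     # On the printable-ASCII domain, .isnumeric() agrees with .isdigit().
--     fd = next((i for i, c in enumerate(s) if c.isnumeric()), None)
--     if fd is None:
--         return True
--     la = None
--     for i, c in enumerate(s):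
--         if c.isalpha():
--             la = i
--     return s[fd] != '0' and (la is None or la < fd)
-- ===== Notes on version B (the rewrite author's own statement) =====
-- stated objective: alternative
-- what changed: B replaces A's single stateful early-return scan with index arithmetic: it finds the index of the first digit and the index of the last letter, then decides by comparing them (first digit != '0' and last letter before first digit).
import Mathlib
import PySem

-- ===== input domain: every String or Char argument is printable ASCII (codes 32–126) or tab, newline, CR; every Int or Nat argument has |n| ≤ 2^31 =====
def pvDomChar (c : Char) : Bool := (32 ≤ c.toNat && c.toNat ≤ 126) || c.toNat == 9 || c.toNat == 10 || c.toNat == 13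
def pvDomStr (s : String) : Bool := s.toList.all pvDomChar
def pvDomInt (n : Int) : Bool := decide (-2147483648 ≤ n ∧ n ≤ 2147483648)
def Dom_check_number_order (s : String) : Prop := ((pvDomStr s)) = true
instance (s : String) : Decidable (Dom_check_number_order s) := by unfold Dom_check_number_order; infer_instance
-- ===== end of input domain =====

-- B finds the first-digit index and the last-letter index and decides by comparing them,
-- instead of A's stateful early-return scan; objective: alternative (same O(n) cost).
-- On the ASCII domain, Python's .isnumeric() coincides with .isdigit() (PySem.Chars.isdigit is exact there).

-- ===== PORT A =====
def goA : List Char → Bool → Bool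
  | [], _ => true
  | c :: rest, number =>
    if PySem.Chars.isdigit c then
      (if c == '0' && number == false then false
       else if (true : Bool) == true && PySem.Chars.isalpha c then false
       else goA rest true)
    else
      if number == true && PySem.Chars.isalpha c then false
      else goA rest number

def check_number_order (s : String) : Bool := goA s.toList false

-- ===== PORT B =====
-- the 'for i, c in enumerate(s): if c.isalpha(): la = i' loop of Source B
def lastAlphaAux : Nat → List Char → Option Nat → Option Nat
  | _, [], la => la
  | i, c :: cs, la => lastAlphaAux (i + 1) cs (if PySem.Chars.isalpha c then some i else la)

def check_number_order_alt (s : String) : Bool :=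
  let cs := s.toList
  match cs.findIdx? PySem.Chars.isdigit with   -- next((i for i,c in enumerate(s) if c.isnumeric()), None)
  | none => true
  | some fd =>
    let la := lastAlphaAux 0 cs none
    (cs.getD fd ' ' != '0') && (match la with | none => true | some l => decide (l < fd))

-- ===== PRECONDITION & SPEC =====
def Spec_check_number_order (s : String) (out : Bool) : Prop := out = check_number_order_alt s
instance (s : String) (out : Bool) : Decidable (Spec_check_number_order s out) := by unfold Spec_check_number_order; infer_instance

-- ===== CLAIM (what is proved, stated in full; the proofs are below) =====
def Claim_equal_check_number_order : Prop := ∀ (s : String), Dom_check_number_order s → Spec_check_number_order s (check_number_order s)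

-- ===== LEMMAS AND PROOFS =====

-- "last-letter index is below fd (or there is none)" — B's final test
def optLt (o : Option Nat) (fd : Nat) : Bool :=
  match o with | none => true | some l => decide (l < fd)

theorem isalpha_of_isdigit {c : Char} (h : PySem.Chars.isdigit c = true) :
    PySem.Chars.isalpha c = false := by
  unfold PySem.Chars.isdigit PySem.Chars.isalpha PySem.Chars.isupper PySem.Chars.islower at *
  simp only [Bool.and_eq_true, decide_eq_true_eq, Char.le_def, UInt32.le_iff_toNat_le] at h
  simp only [Bool.or_eq_false_iff, Bool.and_eq_false_iff, decide_eq_false_iff_not, Char.le_def,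
    UInt32.le_iff_toNat_le, not_le]
  have e1 : ('0' : Char).val.toNat = 48 := rfl
  have e2 : ('9' : Char).val.toNat = 57 := rfl
  have e3 : ('A' : Char).val.toNat = 65 := rfl
  have e4 : ('Z' : Char).val.toNat = 90 := rfl
  have e5 : ('a' : Char).val.toNat = 97 := rfl
  have e6 : ('z' : Char).val.toNat = 122 := rfl
  omega

-- goA with the flag already set just checks that no letter remains
theorem goA_true (cs : List Char) : goA cs true = !(cs.any PySem.Chars.isalpha) := by
  induction cs with
  | nil => rfl
  | cons c rest ih =>
    by_cases hd : PySem.Chars.isdigit c = true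
    · simp [goA, hd, isalpha_of_isdigit hd, ih]
    · simp only [goA, if_neg hd]
      by_cases ha : PySem.Chars.isalpha c = true <;> simp [ha, ih]

-- characterisation of A's scan from a clear flag
theorem goA_false (cs : List Char) :
    goA cs false =
      (match cs.findIdx? PySem.Chars.isdigit with
       | none => true
       | some fd => (cs.getD fd ' ' != '0') && !((cs.drop fd).any PySem.Chars.isalpha)) := by
  induction cs with
  | nil => rfl
  | cons c rest ih =>
    by_cases hd : PySem.Chars.isdigit c = true
    · simp only [goA, List.findIdx?_cons, hd, isalpha_of_isdigit hd]
      by_cases h0 : c = '0'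
      · simp [h0]
      · simp [h0, goA_true, isalpha_of_isdigit hd]
    · simp only [goA, List.findIdx?_cons, hd, Bool.false_eq_true, if_neg, not_false_eq_true, ih]
      cases hfi : rest.findIdx? PySem.Chars.isdigit with
      | none => simp
      | some fd => simp

-- once the scan index is at or past fd, the test optLt · fd only asks "no letter remains"
theorem optLt_lastAlphaAux_past (cs : List Char) : ∀ (k : Nat) (acc : Option Nat) (fd : Nat),
    fd ≤ k →
    optLt (lastAlphaAux k cs acc) fd = (optLt acc fd && !(cs.any PySem.Chars.isalpha)) := by
  induction cs with
  | nil => intro k acc fd _; simp [lastAlphaAux]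
  | cons c rest ih =>
    intro k acc fd hfd
    simp only [lastAlphaAux]
    rw [ih (k + 1) _ fd (by omega)]
    by_cases ha : PySem.Chars.isalpha c = true
    · have : ¬ k < fd := by omega
      simp [ha, optLt, this]
    · simp [ha]

-- the general invariant for B's last-letter loop against "no letter from position d on"
theorem optLt_lastAlphaAux (cs : List Char) : ∀ (d k : Nat) (acc : Option Nat),
    (∀ l, acc = some l → l < k) →
    optLt (lastAlphaAux k cs acc) (k + d) = !((cs.drop d).any PySem.Chars.isalpha) := by
  induction cs with
  | nil =>
    intro d k acc hacc
    cases hacc' : acc with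
    | none => simp [lastAlphaAux, optLt]
    | some l => have := hacc l hacc'; simp [lastAlphaAux, optLt]; omega
  | cons c rest ih =>
    intro d k acc hacc
    cases d with
    | zero =>
      simp only [lastAlphaAux, Nat.add_zero, List.drop_zero]
      rw [optLt_lastAlphaAux_past rest (k + 1) _ k (by omega)]
      by_cases ha : PySem.Chars.isalpha c = true
      · have : ¬ k < k := by omega
        simp [ha, optLt]
      · have hacc' : optLt acc k = true := by
          cases h : acc with
          | none => simp [optLt]
          | some l => have := hacc l h; simp [optLt]; omega
        simp [ha, hacc']
    | succ d' =>
      simp only [lastAlphaAux, List.drop_succ_cons]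
      have harith : k + (d' + 1) = (k + 1) + d' := by omega
      rw [harith, ih d' (k + 1) _
            (by intro l hl
                by_cases ha : PySem.Chars.isalpha c = true
                · simp [ha] at hl; omega
                · simp [ha] at hl; have := hacc l hl; omega)]

theorem lastAlpha_drop (cs : List Char) (fd : Nat) :
    optLt (lastAlphaAux 0 cs none) fd = !((cs.drop fd).any PySem.Chars.isalpha) := by
  have := optLt_lastAlphaAux cs fd 0 none (by intro l h; cases h)
  simpa using this

-- ===== VERDICT (by name: the statement is the Claim_ definition above) =====
theorem check_number_order_spec : Claim_equal_check_number_order := by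
  intro s _
  show check_number_order s = check_number_order_alt s
  unfold check_number_order check_number_order_alt
  rw [goA_false]
  cases h : s.toList.findIdx? PySem.Chars.isdigit with
  | none => simp [h]
  | some fd =>
    have hla := lastAlpha_drop s.toList fd
    simp only [h, optLt] at *
    rw [hla]
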